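-- pv_equiv track=rewrite | github.com/Brandon-820/Advent-of-Code | D9P2/D9P2.py | extrapolate_and_sum
-- ===== SOURCE A (Python) =====
-- def extrapolate_and_sum(histories):
--     total = 0
--     for history in histories:
--         historyTriangulation = []
--         historyTriangulation.append(history)
--         while True:
--             differences = [history[i+1] - history[i] for i in range(len(history)-1)]
--             if all(d == 0 for d in differences):
--                 historyTriangulation.append(differences)
--                 break
--             else:
--                 history = differences
--                 historyTriangulation.append(differences)
--
--         row = len(historyTriangulation) - 1
--         historyTriangulation[row].insert(0, 0)
--         for r in range(row, 0, -1):
--             historyTriangulation[r-1].insert(0, historyTriangulation[r-1][0] - historyTriangulation[r][0])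
--
--         total += historyTriangulation[0][0]
--
--     return total
-- ===== SOURCE B (Python) =====
-- def extrapolate_and_sum(histories):
--     total = 0
--     for history in histories:
--         firsts = [history[0]]
--         row = history
--         while True:
--             row = [row[i + 1] - row[i] for i in range(len(row) - 1)]
--             if all(d == 0 for d in row):
--                 break
--             firsts.append(row[0])
--         s = 0
--         sign = 1
--         for f in firsts:
--             s += sign * f
--             sign = -sign
--         total += s
--     return total
-- ===== Notes on version B (the rewrite author's own statement) =====
-- stated objective: simpler
-- what changed: Instead of storing every difference row and back-filling each with insert(0,...), B keeps only the first element of each non-zero row and combines them with an alternating-sign sum.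
import Mathlib
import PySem

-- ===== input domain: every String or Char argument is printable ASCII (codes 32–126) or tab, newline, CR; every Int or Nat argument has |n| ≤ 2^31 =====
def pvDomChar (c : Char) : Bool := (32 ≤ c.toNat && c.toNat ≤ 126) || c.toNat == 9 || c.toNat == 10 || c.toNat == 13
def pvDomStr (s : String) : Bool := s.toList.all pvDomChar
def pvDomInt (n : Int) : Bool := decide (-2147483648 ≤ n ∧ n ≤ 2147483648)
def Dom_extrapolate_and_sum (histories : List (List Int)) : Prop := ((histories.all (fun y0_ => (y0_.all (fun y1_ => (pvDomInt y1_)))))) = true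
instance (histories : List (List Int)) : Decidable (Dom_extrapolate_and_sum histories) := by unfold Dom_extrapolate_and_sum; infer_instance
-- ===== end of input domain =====

-- B replaces A's stored difference triangle and insert(0,...) back-fill by an
-- alternating-sign sum of the first elements of the non-zero rows (objective: simpler).
-- Python A mutates its argument in place (insert(0,...) into each original history list);
-- B does not: the equivalence proved here is about the RETURN value only.

-- ===== PORT A =====
-- differences = [history[i+1] - history[i] for i in range(len(history)-1)]
-- (indices i and i+1 are always in range, so getD is exact)
def pyDiffA (h : List Int) : List Int :=
  (List.range (h.length - 1)).map (fun i => h.getD (i + 1) 0 - h.getD i 0)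

-- the while-loop: collect history and every difference row, stopping at the all-zero row
def buildTri (h : List Int) : List (List Int) :=
  let d := pyDiffA h
  if d.all (· == 0) then [h, d]
  else h :: buildTri d
termination_by h.length
decreasing_by
  rename_i hx
  have hne : pyDiffA h ≠ [] := by
    intro hnil
    exact hx (by rw [show d = pyDiffA h from rfl, hnil]; rfl)
  have : 0 < (pyDiffA h).length := List.length_pos_of_ne_nil hne
  have hlen : (pyDiffA h).length = h.length - 1 := by simp [pyDiffA]
  omega

-- the back-fill loop: prepend 0 to the last row, then tri[r-1].insert(0, tri[r-1][0] - tri[r][0])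
-- (the [0] accesses use headD 0; exact because under Pre_ every accessed row is nonempty)
def backfill : List (List Int) → List (List Int)
  | [] => []
  | [last] => [0 :: last]
  | p :: q :: rest =>
      let rest' := backfill (q :: rest)
      ((p.headD 0 - (rest'.headD []).headD 0) :: p) :: rest'

def extrapolate_and_sum (histories : List (List Int)) : Int :=
  histories.foldl (fun total history =>
    total + ((backfill (buildTri history)).headD []).headD 0) 0

-- ===== PORT B =====
def pyDiffB (h : List Int) : List Int :=
  (List.range (h.length - 1)).map (fun i => h.getD (i + 1) 0 - h.getD i 0)

-- the while-loop of Source B: the first element of each non-zero difference row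
def collectFirsts (row : List Int) : List Int :=
  let d := pyDiffB row
  if d.all (· == 0) then []
  else d.headD 0 :: collectFirsts d
termination_by row.length
decreasing_by
  rename_i hx
  have hne : pyDiffB row ≠ [] := by
    intro hnil
    exact hx (by rw [show d = pyDiffB row from rfl, hnil]; rfl)
  have : 0 < (pyDiffB row).length := List.length_pos_of_ne_nil hne
  have hlen : (pyDiffB row).length = row.length - 1 := by simp [pyDiffB]
  omega

-- the s/sign loop of Source B
def altSum (firsts : List Int) : Int :=
  (firsts.foldl (fun st f => (st.1 + st.2 * f, -st.2)) ((0 : Int), (1 : Int))).1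

-- history[0] is ported as headD 0; exact because Pre_ demands nonempty histories
def extrapolate_and_sum_alt (histories : List (List Int)) : Int :=
  histories.foldl (fun total history =>
    total + altSum (history.headD 0 :: collectFirsts history)) 0

-- ===== PRECONDITION & SPEC =====
-- Both Pythons raise IndexError on an empty history (A in the back-fill, B at history[0]).
def Pre_extrapolate_and_sum (histories : List (List Int)) : Prop :=
  ∀ h ∈ histories, h ≠ []
instance (histories : List (List Int)) : Decidable (Pre_extrapolate_and_sum histories) := by
  unfold Pre_extrapolate_and_sum; infer_instance

def pvWitness_extrapolate_and_sum : List (List Int) := [[10, 13, 16, 21, 30, 45], [0, 3, 6, 9]]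

def Spec_extrapolate_and_sum (histories : List (List Int)) (out : Int) : Prop := out = extrapolate_and_sum_alt histories
instance (histories : List (List Int)) (out : Int) : Decidable (Spec_extrapolate_and_sum histories out) := by unfold Spec_extrapolate_and_sum; infer_instance

-- ===== CLAIM (what is proved, stated in full; the proofs are below) =====
def Claim_equal_extrapolate_and_sum : Prop := ∀ (histories : List (List Int)), Dom_extrapolate_and_sum histories → Pre_extrapolate_and_sum histories → Spec_extrapolate_and_sum histories (extrapolate_and_sum histories)

-- ===== LEMMAS AND PROOFS =====

-- mathematical alternating sum
def altRec : List Int → Int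
  | [] => 0
  | x :: ys => x - altRec ys

lemma altSum_aux (l : List Int) : ∀ s g : Int,
    (l.foldl (fun st f => (st.1 + st.2 * f, -st.2)) (s, g)).1 = s + g * altRec l := by
  induction l with
  | nil => intro s g; simp [altRec]
  | cons x ys ih =>
      intro s g
      simp only [List.foldl_cons, altRec, ih]
      ring

lemma altSum_eq (l : List Int) : altSum l = altRec l := by
  simpa using altSum_aux l 0 1

lemma pyDiffB_eq (h : List Int) : pyDiffB h = pyDiffA h := rfl

lemma buildTri_shape (h : List Int) : ∃ a t, buildTri h = h :: a :: t := by
  rw [buildTri.eq_def]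
  by_cases hall : (pyDiffA h).all (· == 0) = true
  · exact ⟨pyDiffA h, [], by simp [hall]⟩
  · simp only [hall, Bool.false_eq_true, if_false]
    rcases buildTri_shape (pyDiffA h) with ⟨a, t, ht⟩
    exact ⟨pyDiffA h, a :: t, by rw [ht]⟩
termination_by h.length
decreasing_by
  have hne : pyDiffA h ≠ [] := by
    intro hnil
    exact hall (by simp [hnil])
  have : 0 < (pyDiffA h).length := List.length_pos_of_ne_nil hne
  have hlen : (pyDiffA h).length = h.length - 1 := by simp [pyDiffA]
  omega

lemma per_history_eq (h : List Int) :
    ((backfill (buildTri h)).headD []).headD 0 = altRec (h.headD 0 :: collectFirsts h) := by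
  rw [buildTri.eq_def, collectFirsts.eq_def, pyDiffB_eq]
  by_cases hall : (pyDiffA h).all (· == 0) = true
  · simp [hall, backfill, altRec]
  · simp only [hall, Bool.false_eq_true, if_false]
    rcases buildTri_shape (pyDiffA h) with ⟨a, t, ht⟩
    have ih := per_history_eq (pyDiffA h)
    rw [ht] at ih ⊢
    simp only [backfill, altRec, List.headD_cons] at ih ⊢
    omega
termination_by h.length
decreasing_by
  have hne : pyDiffA h ≠ [] := by
    intro hnil
    exact hall (by simp [hnil])
  have : 0 < (pyDiffA h).length := List.length_pos_of_ne_nil hne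
  have hlen : (pyDiffA h).length = h.length - 1 := by simp [pyDiffA]
  omega

lemma foldl_eq (l : List (List Int)) : ∀ t : Int,
    l.foldl (fun total history =>
      total + ((backfill (buildTri history)).headD []).headD 0) t
    = l.foldl (fun total history =>
      total + altSum (history.headD 0 :: collectFirsts history)) t := by
  induction l with
  | nil => intro t; rfl
  | cons h hs ih =>
      intro t
      simp only [List.foldl_cons, altSum_eq, per_history_eq]

-- ===== VERDICT (by name: the statement is the Claim_ definition above) =====
theorem extrapolate_and_sum_spec : Claim_equal_extrapolate_and_sum := by
  intro histories _ _
  unfold Spec_extrapolate_and_sum extrapolate_and_sum extrapolate_and_sum_alt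
  exact foldl_eq histories 0
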